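-- pv_equiv track=rewrite | github.com/mckornfield/aoc-2019 | day3/src/solution.py | generate_spots_between_positions
-- ===== SOURCE A (Python) =====
-- def write_range(p_0: int, p_1: int) -> range:
--     if p_1 > p_0:
--         return range(p_0, p_1 + 1)
--     else:
--         return range(p_1, p_0 + 1)
--
-- def generate_spots_between_positions(pos1: tuple, pos2: tuple) -> list:
--     if pos1 == pos2:
--         return []
--     x_0, y_0 = pos1
--     x_1, y_1 = pos2
--     if x_0 == x_1:
--         y_range = write_range(y_0, y_1)
--         x_range = [x_0] * len(y_range)
--     else:
--         x_range = write_range(x_0, x_1)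
--         y_range = [y_0] * len(x_range)
--     spots_covered = [(x, y)
--                      for x, y in zip(x_range, y_range)
--                      ]
--     if spots_covered[0] != pos1:
--         spots_covered.reverse()
--     return spots_covered
-- ===== SOURCE B (Python) =====
-- def generate_spots_between_positions(pos1: tuple, pos2: tuple) -> list:
--     if pos1 == pos2:
--         return []
--     (x_0, y_0), (x_1, y_1) = pos1, pos2
--     if x_0 == x_1:
--         step = 1 if y_1 > y_0 else -1
--         return [(x_0, y) for y in range(y_0, y_1 + step, step)]
--     step = 1 if x_1 > x_0 else -1
--     return [(x, y_0) for x in range(x_0, x_1 + step, step)]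
-- ===== Notes on version B (the rewrite author's own statement) =====
-- stated objective: simpler
-- what changed: B picks the stepping axis, computes a signed unit step, and emits the points directly from pos1 with one signed range per branch, instead of A's build-an-ascending-range-zip-then-conditionally-reverse pipeline.
import Mathlib
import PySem

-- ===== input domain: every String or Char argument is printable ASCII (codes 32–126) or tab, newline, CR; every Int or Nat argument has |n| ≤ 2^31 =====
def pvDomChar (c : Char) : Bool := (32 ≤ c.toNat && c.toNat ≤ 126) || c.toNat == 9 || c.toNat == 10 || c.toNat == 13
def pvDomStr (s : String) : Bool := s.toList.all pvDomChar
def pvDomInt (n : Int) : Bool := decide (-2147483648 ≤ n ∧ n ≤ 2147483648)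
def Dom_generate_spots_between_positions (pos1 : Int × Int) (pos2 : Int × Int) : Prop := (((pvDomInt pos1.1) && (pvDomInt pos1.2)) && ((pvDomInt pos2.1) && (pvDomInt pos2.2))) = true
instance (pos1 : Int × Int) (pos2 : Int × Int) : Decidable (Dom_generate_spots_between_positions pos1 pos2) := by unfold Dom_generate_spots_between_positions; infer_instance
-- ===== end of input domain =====

-- B emits the points directly from pos1 using a signed step (simpler: no ascending-range build plus post-hoc reverse); same return values as A, including A's constant-y_0 behaviour when x_0 != x_1.

-- ===== PORT A =====
def write_range (p0 p1 : Int) : List Int :=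
  if p1 > p0 then PySem.List.pyRange p0 (p1 + 1) 1
  else PySem.List.pyRange p1 (p0 + 1) 1

def generate_spots_between_positions (pos1 : Int × Int) (pos2 : Int × Int) : List (Int × Int) :=
  if pos1 = pos2 then []
  else
    let xy :=
      if pos1.1 = pos2.1 then
        let y_range := write_range pos1.2 pos2.2
        (List.replicate y_range.length pos1.1, y_range)
      else
        let x_range := write_range pos1.1 pos2.1
        (x_range, List.replicate x_range.length pos1.2)
    let spots_covered := List.zip xy.1 xy.2
    if PySem.List.pyGet? spots_covered 0 ≠ some pos1 then spots_covered.reverse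
    else spots_covered

-- ===== PORT B =====
def generate_spots_between_positions_alt (pos1 : Int × Int) (pos2 : Int × Int) : List (Int × Int) :=
  if pos1 = pos2 then []
  else if pos1.1 = pos2.1 then
    let step : Int := if pos2.2 > pos1.2 then 1 else -1
    (PySem.List.pyRange pos1.2 (pos2.2 + step) step).map (fun y => (pos1.1, y))
  else
    let step : Int := if pos2.1 > pos1.1 then 1 else -1
    (PySem.List.pyRange pos1.1 (pos2.1 + step) step).map (fun x => (x, pos1.2))

-- ===== PRECONDITION & SPEC =====
def Spec_generate_spots_between_positions (pos1 : Int × Int) (pos2 : Int × Int) (out : List (Int × Int)) : Prop := out = generate_spots_between_positions_alt pos1 pos2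
instance (pos1 : Int × Int) (pos2 : Int × Int) (out : List (Int × Int)) : Decidable (Spec_generate_spots_between_positions pos1 pos2 out) := by unfold Spec_generate_spots_between_positions; infer_instance

-- ===== CLAIM (what is proved, stated in full; the proofs are below) =====
def Claim_equal_generate_spots_between_positions : Prop := ∀ (pos1 : Int × Int) (pos2 : Int × Int), Dom_generate_spots_between_positions pos1 pos2 → Spec_generate_spots_between_positions pos1 pos2 (generate_spots_between_positions pos1 pos2)

-- ===== LEMMAS AND PROOFS =====

theorem pv_zip_replicate_left {α β : Type} (c : α) (ys : List β) :
    List.zip (List.replicate ys.length c) ys = ys.map (fun y => (c, y)) := by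
  induction ys with
  | nil => rfl
  | cons y t ih =>
    simpa [List.replicate_succ, List.zip_cons_cons] using ih

theorem pv_zip_replicate_right {α β : Type} (c : β) (xs : List α) :
    List.zip xs (List.replicate xs.length c) = xs.map (fun x => (x, c)) := by
  induction xs with
  | nil => rfl
  | cons x t ih =>
    simpa [List.replicate_succ, List.zip_cons_cons] using ih

theorem pv_A_vert (x y0 y1 : Int) (h : y0 ≠ y1) :
    generate_spots_between_positions (x, y0) (x, y1)
      = if y1 > y0 then (PySem.List.pyRange y0 (y1 + 1) 1).map (fun y => (x, y))
        else ((PySem.List.pyRange y1 (y0 + 1) 1).map (fun y => (x, y))).reverse := by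
  have hne : ((x, y0) : Int × Int) ≠ (x, y1) := by simp [h]
  unfold generate_spots_between_positions write_range
  rw [if_neg hne]
  simp only [if_true]
  by_cases hgt : y1 > y0
  · rw [if_pos hgt, if_pos hgt, pv_zip_replicate_left,
      PySem.List.pyRange_one_cons (by omega : y0 < y1 + 1)]
    simp
  · rw [if_neg hgt, if_neg hgt, pv_zip_replicate_left,
      PySem.List.pyRange_one_cons (by omega : y1 < y0 + 1)]
    simp only [List.map_cons, PySem.List.pyGet?_zero_cons]
    rw [if_pos (by simp; omega)]

theorem pv_A_horiz (x0 y0 x1 y1 : Int) (h : x0 ≠ x1) :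
    generate_spots_between_positions (x0, y0) (x1, y1)
      = if x1 > x0 then (PySem.List.pyRange x0 (x1 + 1) 1).map (fun x => (x, y0))
        else ((PySem.List.pyRange x1 (x0 + 1) 1).map (fun x => (x, y0))).reverse := by
  have hne : ((x0, y0) : Int × Int) ≠ (x1, y1) := by simp; intro hc; exact absurd hc h
  unfold generate_spots_between_positions write_range
  rw [if_neg hne]
  simp only [if_neg h]
  by_cases hgt : x1 > x0
  · rw [if_pos hgt, pv_zip_replicate_right,
      PySem.List.pyRange_one_cons (by omega : x0 < x1 + 1)]
    simp
    exact fun hc => absurd hgt (by omega)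
  · rw [if_neg hgt, pv_zip_replicate_right,
      PySem.List.pyRange_one_cons (by omega : x1 < x0 + 1)]
    simp only [List.map_cons, PySem.List.pyGet?_zero_cons]
    rw [if_pos (by simp; omega), if_neg hgt]

-- ===== VERDICT (by name: the statement is the Claim_ definition above) =====
theorem generate_spots_between_positions_spec : Claim_equal_generate_spots_between_positions := by
  intro pos1 pos2 _
  obtain ⟨x0, y0⟩ := pos1
  obtain ⟨x1, y1⟩ := pos2
  unfold Spec_generate_spots_between_positions
  by_cases hpq : ((x0, y0) : Int × Int) = (x1, y1)
  · simp [generate_spots_between_positions, generate_spots_between_positions_alt, hpq]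
  · by_cases hx : x0 = x1
    · have hy : y0 ≠ y1 := fun h => hpq (by rw [hx, h])
      subst hx
      rw [pv_A_vert x0 y0 y1 hy]
      unfold generate_spots_between_positions_alt
      rw [if_neg hpq, if_pos rfl]
      by_cases hgt : y1 > y0
      · simp only [if_pos hgt]
      · simp only [if_neg hgt]
        rw [show PySem.List.pyRange y0 (y1 + -1) (-1)
              = (PySem.List.pyRange y1 (y0 + 1) 1).reverse from by
          rw [PySem.List.pyRange_neg_one_eq_reverse]; norm_num]
        rw [List.map_reverse]
    · rw [pv_A_horiz x0 y0 x1 y1 hx]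
      unfold generate_spots_between_positions_alt
      rw [if_neg hpq, if_neg hx]
      by_cases hgt : x1 > x0
      · simp only [if_pos hgt]
      · simp only [if_neg hgt]
        rw [show PySem.List.pyRange x0 (x1 + -1) (-1)
              = (PySem.List.pyRange x1 (x0 + 1) 1).reverse from by
          rw [PySem.List.pyRange_neg_one_eq_reverse]; norm_num]
        rw [List.map_reverse]
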